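-- pv_equiv track=rewrite | github.com/TiMeLeSsWorld00/ASCPD | module3/src/inverted_index.py | gamma_decompress
-- ===== SOURCE A (Python) =====
-- from typing import List
--
-- def gamma_decompress(com_numbers: int) -> List[int]:
--     numbers = []
--
--     bitstream = list(format(com_numbers, 'b'))
--     bitstream.reverse()
--
--     read_zeros = True
--     N = 1
--     number = []
--     previous_number = 0
--     for bit in bitstream:
--         if read_zeros:
--             if bit == '0':
--                 N += 1
--                 continue
--             else:
--                 read_zeros = False
--         number.append(bit)
--         N -= 1
--         if N == 0:
--             read_zeros = True
--             N = 1
--             numbers.append(previous_number + int(''.join(number), 2))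
--             previous_number = numbers[-1]
--             number = []
--     return numbers
-- ===== SOURCE B (Python) =====
-- from typing import List
--
-- def gamma_decompress(com_numbers: int) -> List[int]:
--     # Recurse directly on the integer with arithmetic (parity, floor division,
--     # bit_length): no binary string, no bit list, no state machine.  A first
--     # recursive pass peels off one gamma group per call, producing the list of
--     # deltas; a separate second pass turns deltas into cumulative sums.
--
--     def trailing_zeros(m: int) -> int:
--         # m > 0 here, so the recursion terminates.
--         return 0 if m % 2 == 1 else 1 + trailing_zeros(m // 2)
--
--     def take_bits(m: int, k: int):
--         # read the k low bits of m (LSB first, as most-significant digits)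
--         v = 0
--         for _ in range(k):
--             v = 2 * v + m % 2
--             m //= 2
--         return v, m
--
--     def deltas(m: int) -> List[int]:
--         if m <= 0:
--             return []
--         z = trailing_zeros(m)
--         rest = m >> z
--         if rest.bit_length() < z + 1:
--             return []  # partial final group: dropped
--         v, rest2 = take_bits(rest, z + 1)
--         return [v] + deltas(rest2)
--
--     out = []
--     total = 0
--     for d in deltas(com_numbers):
--         total += d
--         out.append(total)
--     return out
-- ===== Notes on version B (the rewrite author's own statement) =====
-- stated objective: alternative
-- what changed: B never builds the binary string or A's read_zeros/N state machine: it recurses directly on the integer with arithmetic (parity, floor division, bit_length), peeling one gamma group per recursive call into a delta list, then accumulates the deltas in a separate second pass.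
-- outside the precondition, e.g. on gamma_decompress(-199): A returns [1, 2, 3], B returns []; on gamma_decompress(-1): A raises ValueError, B returns []
import Mathlib
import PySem

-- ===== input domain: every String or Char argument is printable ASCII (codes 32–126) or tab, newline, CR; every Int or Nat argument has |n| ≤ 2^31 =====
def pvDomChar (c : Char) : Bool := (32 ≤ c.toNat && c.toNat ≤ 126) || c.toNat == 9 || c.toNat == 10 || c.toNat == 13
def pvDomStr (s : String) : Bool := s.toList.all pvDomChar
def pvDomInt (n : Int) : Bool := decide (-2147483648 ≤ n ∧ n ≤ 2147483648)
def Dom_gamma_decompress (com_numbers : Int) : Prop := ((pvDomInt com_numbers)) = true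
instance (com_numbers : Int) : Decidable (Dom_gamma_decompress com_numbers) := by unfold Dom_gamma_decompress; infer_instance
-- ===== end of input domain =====

-- B decodes by recursion on the integer itself (parity / floor division / bit_length),
-- never building the binary string; equivalence is claimed on nonnegative inputs (Pre_).

-- ===== PORT A =====

-- format(m, 'b') for a natural number: binary digits, most significant first ('0' for 0); exact
def pvFmtBin (m : Nat) : List Char :=
  if m < 2 then [if m = 1 then '1' else '0']
  else pvFmtBin (m / 2) ++ [if m % 2 = 1 then '1' else '0']
decreasing_by exact Nat.div_lt_self (by omega) (by decide)

-- int(''.join(cs), 2): exact on strings of '0'/'1' chars (the only case reached inside Pre_,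
-- where the bitstream contains no '-')
def pvBin2Int (cs : List Char) : Int :=
  cs.foldl (fun v c => v * 2 + (if c = '1' then 1 else 0)) 0

-- one loop iteration of A: state = (numbers, read_zeros, N, number, previous_number)
def pvAStep (s : List Int × Bool × Int × List Char × Int) (bit : Char) :
    List Int × Bool × Int × List Char × Int :=
  match s with
  | (numbers, read_zeros, N, number, previous) =>
    if read_zeros && (bit == '0') then (numbers, read_zeros, N + 1, number, previous)
    else
      let number' := number ++ [bit]
      let N' := N - 1
      if N' = 0 then
        let q := previous + pvBin2Int number'
        (numbers ++ [q], true, 1, [], q)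
      else (numbers, false, N', number', previous)

def gamma_decompress (com_numbers : Int) : List Int :=
  let bitstream :=
    (if com_numbers < 0 then '-' :: pvFmtBin com_numbers.natAbs
     else pvFmtBin com_numbers.toNat).reverse
  (bitstream.foldl pvAStep ([], true, 1, [], 0)).1

-- ===== PORT B =====

-- trailing_zeros(m): 0 if m % 2 == 1 else 1 + trailing_zeros(m // 2)
-- (the '0 < m' conjunct only makes the recursion total in Lean; B calls it with m > 0 only)
def pvCtz (m : Int) : Nat :=
  if _h : 0 < m ∧ ¬ PySem.Int.mod m 2 = 1 then 1 + pvCtz (PySem.Int.floordiv m 2) else 0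
termination_by m.toNat
decreasing_by
  rw [PySem.Int.floordiv_eq_ediv_of_pos (by norm_num)]
  omega

-- take_bits(m, k): v = 0; repeat k times: v = 2*v + m % 2; m //= 2; return (v, m)
def pvTakeBits : Nat → Int → Int → Int × Int
  | 0, m, v => (v, m)
  | k + 1, m, v => pvTakeBits k (PySem.Int.floordiv m 2) (2 * v + PySem.Int.mod m 2)

-- bounds on take_bits' second component, cited by pvDeltas' termination proof
theorem pvTakeBits_snd_bounds (k : Nat) : ∀ (m v : Int), 0 ≤ m →
    0 ≤ (pvTakeBits k m v).2 ∧ (pvTakeBits k m v).2 ≤ m := by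
  induction k with
  | zero => intro m v hm; exact ⟨hm, le_rfl⟩
  | succ k ih =>
    intro m v hm
    rw [pvTakeBits, PySem.Int.floordiv_eq_ediv_of_pos (by norm_num)]
    have h := ih (m / 2) (2 * v + PySem.Int.mod m 2) (by omega)
    omega

-- equation lemma for the succ case of take_bits, cited by pvDeltas' termination proof
theorem pvTakeBits_succ (k : Nat) (m v : Int) :
    pvTakeBits (k + 1) m v = pvTakeBits k (PySem.Int.floordiv m 2) (2 * v + PySem.Int.mod m 2) := rfl

-- deltas(m): peel one gamma group per recursive call
def pvDeltas (m : Int) : List Int :=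
  if hm : 0 < m then
    if hr : PySem.Int.bitLength (PySem.Int.floordiv m (2 ^ pvCtz m)) < pvCtz m + 1 then
      []   -- partial final group: dropped
    else
      (pvTakeBits (pvCtz m + 1) (PySem.Int.floordiv m (2 ^ pvCtz m)) 0).1 ::
        pvDeltas (pvTakeBits (pvCtz m + 1) (PySem.Int.floordiv m (2 ^ pvCtz m)) 0).2
  else []
termination_by m.toNat
decreasing_by
  have hR0 : 0 ≤ PySem.Int.floordiv m (2 ^ pvCtz m) := by
    rw [PySem.Int.floordiv_eq_ediv_of_pos (by positivity)]
    exact Int.ediv_nonneg (by omega) (by positivity)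
  have hRle : PySem.Int.floordiv m (2 ^ pvCtz m) ≤ m := by
    rw [PySem.Int.floordiv_eq_ediv_of_pos (by positivity)]
    exact Int.ediv_le_self _ (by omega)
  have hRpos : 0 < PySem.Int.floordiv m (2 ^ pvCtz m) := by
    rcases lt_or_eq_of_le hR0 with h | h
    · exact h
    · exact absurd (by rw [← h, PySem.Int.bitLength_zero]; omega) hr
  have hfd : PySem.Int.floordiv (PySem.Int.floordiv m (2 ^ pvCtz m)) 2 =
      PySem.Int.floordiv m (2 ^ pvCtz m) / 2 :=
    PySem.Int.floordiv_eq_ediv_of_pos (by norm_num)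
  have hb := pvTakeBits_snd_bounds (pvCtz m)
    (PySem.Int.floordiv (PySem.Int.floordiv m (2 ^ pvCtz m)) 2)
    (2 * 0 + PySem.Int.mod (PySem.Int.floordiv m (2 ^ pvCtz m)) 2) (by rw [hfd]; omega)
  rw [pvTakeBits_succ] at *
  omega

-- out = []; total = 0; for d in deltas: total += d; out.append(total)
def pvAccum (total : Int) : List Int → List Int
  | [] => []
  | d :: ds => (total + d) :: pvAccum (total + d) ds

def gamma_decompress_alt (com_numbers : Int) : List Int :=
  pvAccum 0 (pvDeltas com_numbers)

-- ===== PRECONDITION & SPEC =====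
-- Pre_ excludes negative inputs: there A feeds format's '-' sign character into its bit state
-- machine, raising ValueError on many of them and, where the '-' lands mid-group, silently
-- dropping it — an artefact of the string encoding; B treats negatives as having no bits.
def Pre_gamma_decompress (com_numbers : Int) : Prop := 0 ≤ com_numbers
instance (com_numbers : Int) : Decidable (Pre_gamma_decompress com_numbers) := by
  unfold Pre_gamma_decompress; infer_instance

def pvWitness_gamma_decompress : Int := 100

def Spec_gamma_decompress (com_numbers : Int) (out : List Int) : Prop := out = gamma_decompress_alt com_numbers
instance (com_numbers : Int) (out : List Int) : Decidable (Spec_gamma_decompress com_numbers out) := by unfold Spec_gamma_decompress; infer_instance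

-- ===== CLAIM (what is proved, stated in full; the proofs are below) =====
def Claim_equal_gamma_decompress : Prop := ∀ (com_numbers : Int), Dom_gamma_decompress com_numbers → Pre_gamma_decompress com_numbers → Spec_gamma_decompress com_numbers (gamma_decompress com_numbers)

-- ===== LEMMAS AND PROOFS =====

def pvChr (b : Int) : Char := if b = 0 then '0' else '1'

-- proof-side view of the bit stream: the bits of n, least significant first
def pvAltBits (n : Int) : List Int :=
  if _h : 0 < n then PySem.Int.mod n 2 :: pvAltBits (PySem.Int.floordiv n 2) else []
termination_by n.toNat
decreasing_by
  rw [PySem.Int.floordiv_eq_ediv_of_pos (by norm_num)]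
  omega

def pvCountZeros : List Int → Nat
  | [] => 0
  | b :: bs => if b = 0 then pvCountZeros bs + 1 else 0

def pvGroupVal (g : List Int) : Int := g.foldl (fun v b => v * 2 + b) 0

-- proof-side view of B's group parse, phrased on the bit list
def pvParse (bits : List Int) : List Int :=
  if h : pvCountZeros bits + 1 ≤ (bits.drop (pvCountZeros bits)).length then
    pvGroupVal ((bits.drop (pvCountZeros bits)).take (pvCountZeros bits + 1)) ::
      pvParse ((bits.drop (pvCountZeros bits)).drop (pvCountZeros bits + 1))
  else []
termination_by bits.length
decreasing_by simp only [List.length_drop] at *; omega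

theorem pvAltBits_natCast (m : Nat) (h : 0 < m) :
    pvAltBits (m : Int) = ((m % 2 : Nat) : Int) :: pvAltBits ((m / 2 : Nat) : Int) := by
  rw [pvAltBits, dif_pos (Int.natCast_pos.mpr h)]
  congr 1
  · exact_mod_cast PySem.Int.mod_natCast m 2
  · exact_mod_cast congrArg pvAltBits (PySem.Int.floordiv_natCast m 2)

theorem pvAltBits_mem (m : Nat) : ∀ b ∈ pvAltBits (m : Int), b = 0 ∨ b = 1 := by
  induction m using Nat.strong_induction_on with
  | _ m ih =>
    intro b hb
    rcases Nat.eq_zero_or_pos m with h0 | hpos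
    · subst h0; simp [pvAltBits] at hb
    · rw [pvAltBits_natCast m hpos] at hb
      rcases List.mem_cons.mp hb with h | h
      · rcases Nat.mod_two_eq_zero_or_one m with h2 | h2 <;> simp [h, h2]
      · exact ih (m / 2) (Nat.div_lt_self hpos (by decide)) b h

theorem pvFmtBin_eq (m : Nat) (h : 0 < m) :
    pvFmtBin m = ((pvAltBits (m : Int)).map pvChr).reverse := by
  induction m using Nat.strong_induction_on with
  | _ m ih =>
    rw [pvAltBits_natCast m h, pvFmtBin]
    rcases Nat.lt_or_ge m 2 with h2 | h2
    · have hm1 : m = 1 := by omega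
      subst hm1
      rw [if_pos (by decide), pvAltBits, dif_neg (by decide)]
      norm_num [pvChr]
    · have hd : 0 < m / 2 := Nat.div_pos h2 (by decide)
      rw [if_neg (by omega), ih (m / 2) (Nat.div_lt_self h (by decide)) hd]
      rcases Nat.mod_two_eq_zero_or_one m with hm | hm <;> simp [hm, pvChr]

-- the three shapes of one step of A's loop
theorem pvAStep_zero (acc : List Int) (N : Int) (num : List Char) (p : Int) :
    pvAStep (acc, true, N, num, p) '0' = (acc, true, N + 1, num, p) := by
  simp [pvAStep]

theorem pvAStep_read (acc : List Int) (N : Int) (num : List Char) (p : Int) (c : Char)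
    (hN : ¬ N - 1 = 0) :
    pvAStep (acc, false, N, num, p) c = (acc, false, N - 1, num ++ [c], p) := by
  simp [pvAStep, hN]

theorem pvAStep_emit (acc : List Int) (N : Int) (num : List Char) (p : Int) (c : Char)
    (hN : N - 1 = 0) :
    pvAStep (acc, false, N, num, p) c =
      (acc ++ [p + pvBin2Int (num ++ [c])], true, 1, [], p + pvBin2Int (num ++ [c])) := by
  simp [pvAStep, hN]

theorem pvAStep_first (acc : List Int) (N : Int) (num : List Char) (p : Int) (c : Char)
    (hc : ¬ c = '0') :
    pvAStep (acc, true, N, num, p) c = pvAStep (acc, false, N, num, p) c := by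
  simp [pvAStep, hc]

theorem pvZeros_fold (z : Nat) : ∀ (rest : List Char) (acc : List Int) (N : Int)
    (num : List Char) (p : Int),
    (List.replicate z '0' ++ rest).foldl pvAStep (acc, true, N, num, p) =
      rest.foldl pvAStep (acc, true, N + z, num, p) := by
  induction z with
  | zero => intro rest acc N num p; simp
  | succ k ih =>
    intro rest acc N num p
    rw [List.replicate_succ, List.cons_append, List.foldl_cons, pvAStep_zero, ih]
    congr 2
    push_cast
    ring_nf

theorem pvRead_fold (k : Nat) : ∀ (cs : List Char) (acc : List Int)
    (num : List Char) (p : Int), k + 1 ≤ cs.length →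
    cs.foldl pvAStep (acc, false, (k : Int) + 1, num, p) =
      (cs.drop (k + 1)).foldl pvAStep
        (acc ++ [p + pvBin2Int (num ++ cs.take (k + 1))], true, 1, [],
         p + pvBin2Int (num ++ cs.take (k + 1))) := by
  induction k with
  | zero =>
    intro cs acc num p hlen
    match cs with
    | c :: cs' =>
      rw [List.foldl_cons, pvAStep_emit _ _ _ _ _ (by norm_num)]
      simp
  | succ k ih =>
    intro cs acc num p hlen
    match cs with
    | c :: cs' =>
      rw [List.foldl_cons, pvAStep_read _ _ _ _ _ (by push_cast; omega)]
      have harith : ((k + 1 : Nat) : Int) + 1 - 1 = (k : Int) + 1 := by push_cast; omega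
      rw [harith, ih cs' acc (num ++ [c]) p (by simpa using hlen)]
      simp

theorem pvStarve_fold : ∀ (cs : List Char) (N : Int) (acc : List Int)
    (num : List Char) (p : Int), (cs.length : Int) < N →
    (cs.foldl pvAStep (acc, false, N, num, p)).1 = acc := by
  intro cs
  induction cs with
  | nil => intro N acc num p _; rfl
  | cons c cs' ih =>
    intro N acc num p hlen
    simp only [List.length_cons] at hlen
    rw [List.foldl_cons, pvAStep_read _ _ _ _ _ (by push_cast at hlen ⊢; omega)]
    exact ih (N - 1) acc (num ++ [c]) p (by push_cast at hlen ⊢; omega)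

theorem pvCountZeros_take (bits : List Int) :
    bits.take (pvCountZeros bits) = List.replicate (pvCountZeros bits) 0 := by
  induction bits with
  | nil => simp [pvCountZeros]
  | cons b bs ih =>
    by_cases h : b = 0
    · simp [pvCountZeros, h, List.replicate_succ, ih]
    · simp [pvCountZeros, h]

theorem pvCountZeros_drop (bits : List Int) (hb : ∀ b ∈ bits, b = 0 ∨ b = 1) :
    bits.drop (pvCountZeros bits) = [] ∨
      ∃ tail, bits.drop (pvCountZeros bits) = 1 :: tail := by
  induction bits with
  | nil => left; simp
  | cons b bs ih =>
    by_cases h : b = 0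
    · simpa [pvCountZeros, h] using ih (fun x hx => hb x (List.mem_cons_of_mem _ hx))
    · right
      have hb1 : b = 1 := (hb b (List.mem_cons_self)).resolve_left h
      exact ⟨bs, by simp [pvCountZeros, hb1]⟩

theorem pvBin2Int_fold (g : List Int) (hg : ∀ b ∈ g, b = 0 ∨ b = 1) : ∀ v : Int,
    (g.map pvChr).foldl (fun v c => v * 2 + (if c = '1' then 1 else 0)) v =
      g.foldl (fun v b => v * 2 + b) v := by
  induction g with
  | nil => intro v; rfl
  | cons b bs ih =>
    intro v
    have hb : (if pvChr b = '1' then (1 : Int) else 0) = b := by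
      rcases hg b List.mem_cons_self with h | h <;> simp [pvChr, h]
    simp only [List.map_cons, List.foldl_cons, hb]
    exact ih (fun x hx => hg x (List.mem_cons_of_mem _ hx)) _

theorem pvBin2Int_map (g : List Int) (hg : ∀ b ∈ g, b = 0 ∨ b = 1) :
    pvBin2Int (g.map pvChr) = pvGroupVal g :=
  pvBin2Int_fold g hg 0

-- A's fold over the char stream computes pvAccum of pvParse of the bit list
theorem pvMain (L : Nat) : ∀ (bits : List Int), bits.length ≤ L →
    (∀ b ∈ bits, b = 0 ∨ b = 1) → ∀ (acc : List Int) (p : Int),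
    ((bits.map pvChr).foldl pvAStep (acc, true, 1, [], p)).1 =
      acc ++ pvAccum p (pvParse bits) := by
  induction L with
  | zero =>
    intro bits hlen hb acc p
    have hnil : bits = [] := List.eq_nil_of_length_eq_zero (Nat.le_zero.mp hlen)
    subst hnil
    rw [pvParse]
    simp [pvCountZeros, pvAccum]
  | succ L ih =>
    intro bits hlen hb acc p
    have hz : bits.take (pvCountZeros bits) = List.replicate (pvCountZeros bits) 0 :=
      pvCountZeros_take bits
    have hsplit : bits = List.replicate (pvCountZeros bits) 0 ++
        bits.drop (pvCountZeros bits) := by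
      conv_lhs => rw [← List.take_append_drop (pvCountZeros bits) bits]
      rw [hz]
    rcases pvCountZeros_drop bits hb with hnil | ⟨tail, htail⟩
    · -- only zeros: no complete group, A appends nothing
      have hmap : bits.map pvChr = List.replicate (pvCountZeros bits) '0' ++ [] := by
        conv_lhs => rw [hsplit, hnil]
        simp [pvChr]
      rw [hmap, pvZeros_fold, pvParse, dif_neg (by rw [hnil]; simp)]
      simp [pvAccum]
    · -- a 1 after the zeros starts a group
      have htmem : ∀ b ∈ tail, b = 0 ∨ b = 1 := fun b hbm =>
        hb b (List.mem_of_mem_drop (htail ▸ List.mem_cons_of_mem _ hbm))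
      have hlen' : bits.length = pvCountZeros bits + 1 + tail.length := by
        conv_lhs => rw [hsplit, htail]
        simp; omega
      have hmap : bits.map pvChr = List.replicate (pvCountZeros bits) '0' ++
          ('1' :: tail.map pvChr) := by
        conv_lhs => rw [hsplit, htail]
        simp [pvChr]
      rw [hmap, pvZeros_fold, List.foldl_cons, pvAStep_first _ _ _ _ _ (by decide)]
      rcases Nat.eq_zero_or_pos (pvCountZeros bits) with hz0 | hzpos
      · -- group of length 1: the '1' completes it at once
        rw [pvAStep_emit _ _ _ _ _ (by rw [hz0]; norm_num)]
        have hb1 : pvBin2Int ([] ++ ['1']) = 1 := by decide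
        rw [hb1]
        have hbits : bits = 1 :: tail := by
          conv_lhs => rw [hsplit, htail, hz0]
          simp
        have hparse : pvParse bits = pvGroupVal [1] :: pvParse tail := by
          rw [pvParse, dif_pos (by rw [htail, hz0]; simp)]
          rw [htail, hz0]
          simp
        rw [ih tail (by omega) htmem (acc ++ [p + 1]) (p + 1), hparse]
        have hg1 : pvGroupVal [1] = 1 := by decide
        rw [hg1, pvAccum]
        simp
      · -- longer group: read the remaining z bits of the group
        rw [pvAStep_read _ _ _ _ _ (by omega)]
        have harith : (1 : Int) + (pvCountZeros bits : Int) - 1 = (pvCountZeros bits) := by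
          omega
        rw [harith]
        simp only [List.nil_append]
        by_cases hle : pvCountZeros bits ≤ tail.length
        · -- enough bits: the group completes, then recurse
          have hcast : ((pvCountZeros bits : Int)) = ((pvCountZeros bits - 1 : Nat) : Int) + 1 := by
            push_cast [hzpos]; omega
          have hsub : pvCountZeros bits - 1 + 1 = pvCountZeros bits := by omega
          rw [hcast, pvRead_fold (pvCountZeros bits - 1) (tail.map pvChr) acc ['1'] p
            (by rw [hsub]; simpa using hle), hsub]
          have htk : (tail.map pvChr).take (pvCountZeros bits) =
              (tail.take (pvCountZeros bits)).map pvChr := by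
            rw [List.map_take]
          have hdr : (tail.map pvChr).drop (pvCountZeros bits) =
              (tail.drop (pvCountZeros bits)).map pvChr := by
            rw [List.map_drop]
          have hq : pvBin2Int (['1'] ++ (tail.map pvChr).take (pvCountZeros bits)) =
              pvGroupVal (1 :: tail.take (pvCountZeros bits)) := by
            rw [htk, show (['1'] : List Char) ++ (tail.take (pvCountZeros bits)).map pvChr =
                (1 :: tail.take (pvCountZeros bits)).map pvChr by simp [pvChr]]
            exact pvBin2Int_map _ (by
              intro b hbm
              rcases List.mem_cons.mp hbm with h | h
              · right; exact h
              · exact htmem b (List.mem_of_mem_take h))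
          rw [hq, hdr]
          have hparse : pvParse bits = pvGroupVal (1 :: tail.take (pvCountZeros bits)) ::
              pvParse (tail.drop (pvCountZeros bits)) := by
            rw [pvParse, dif_pos (by rw [htail]; simp; omega)]
            rw [htail]
            simp
          rw [ih (tail.drop (pvCountZeros bits)) (by simp; omega)
            (fun b hbm => htmem b (List.mem_of_mem_drop hbm)) _ _]
          rw [hparse, pvAccum]
          simp
        · -- not enough bits: the last group is dropped
          rw [pvStarve_fold _ _ _ _ _ (by simp; omega)]
          rw [pvParse, dif_neg (by rw [htail]; simp; omega)]
          simp [pvAccum]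

-- ===== the bridge: B's integer recursion computes pvParse of the bit list =====

theorem pvCtz_eq (m : Nat) (h : 0 < m) :
    pvCtz (m : Int) = pvCountZeros (pvAltBits (m : Int)) := by
  induction m using Nat.strong_induction_on with
  | _ m ih =>
    rw [pvAltBits_natCast m h]
    rcases Nat.mod_two_eq_zero_or_one m with hm | hm
    · have hd : 0 < m / 2 := Nat.div_pos (by omega) (by decide)
      rw [pvCtz, dif_pos ⟨Int.natCast_pos.mpr h, by
        rw [show ((2:Int)) = ((2:Nat):Int) from rfl, PySem.Int.mod_natCast, hm]; decide⟩]
      rw [show PySem.Int.floordiv (m : Int) 2 = ((m / 2 : Nat) : Int) from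
        by exact_mod_cast PySem.Int.floordiv_natCast m 2]
      rw [ih (m / 2) (Nat.div_lt_self h (by decide)) hd]
      simp [pvCountZeros, hm, Nat.add_comm]
    · rw [pvCtz, dif_neg (by
        rw [show ((2:Int)) = ((2:Nat):Int) from rfl, PySem.Int.mod_natCast, hm]
        simp)]
      simp [pvCountZeros, hm]

theorem pvBitLength_eq (m : Nat) :
    PySem.Int.bitLength (m : Int) = (pvAltBits (m : Int)).length := by
  induction m using Nat.strong_induction_on with
  | _ m ih =>
    rcases Nat.eq_zero_or_pos m with h0 | hpos
    · subst h0; simp [pvAltBits, PySem.Int.bitLength_zero]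
    · rw [pvAltBits_natCast m hpos, PySem.Int.bitLength_natCast hpos,
        ih (m / 2) (Nat.div_lt_self hpos (by decide))]
      simp

theorem pvShift (k : Nat) : ∀ (m : Nat),
    pvAltBits ((m / 2 ^ k : Nat) : Int) = (pvAltBits (m : Int)).drop k := by
  induction k with
  | zero => intro m; simp
  | succ k ih =>
    intro m
    rcases Nat.eq_zero_or_pos m with h0 | hpos
    · subst h0; simp [Nat.zero_div, pvAltBits]
    · have hdiv : m / 2 ^ (k + 1) = (m / 2) / 2 ^ k := by
        rw [Nat.div_div_eq_div_mul, pow_succ, mul_comm (2 ^ k) 2, ← Nat.div_div_eq_div_mul]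
      rw [hdiv, ih (m / 2), pvAltBits_natCast m hpos]
      simp

theorem pvTakeBits_eq (k : Nat) : ∀ (m : Nat) (v : Int), k ≤ (pvAltBits (m : Int)).length →
    pvTakeBits k (m : Int) v =
      (((pvAltBits (m : Int)).take k).foldl (fun v b => v * 2 + b) v, ((m / 2 ^ k : Nat) : Int)) := by
  induction k with
  | zero => intro m v _; simp [pvTakeBits]
  | succ k ih =>
    intro m v hlen
    have hpos : 0 < m := by
      by_contra h0
      have : m = 0 := by omega
      subst this
      simp [pvAltBits] at hlen
    rw [pvAltBits_natCast m hpos] at hlen ⊢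
    rw [pvTakeBits,
      show PySem.Int.floordiv (m : Int) 2 = ((m / 2 : Nat) : Int) from
        by exact_mod_cast PySem.Int.floordiv_natCast m 2,
      show PySem.Int.mod (m : Int) 2 = ((m % 2 : Nat) : Int) from
        by exact_mod_cast PySem.Int.mod_natCast m 2]
    rw [ih (m / 2) (2 * v + ((m % 2 : Nat) : Int)) (by simpa using hlen)]
    have hdiv : m / 2 / 2 ^ k = m / 2 ^ (k + 1) := by
      rw [Nat.div_div_eq_div_mul, pow_succ, Nat.mul_comm 2 (2 ^ k)]
    rw [hdiv]
    simp [mul_comm]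

theorem pvDeltas_eq (m : Nat) : pvDeltas (m : Int) = pvParse (pvAltBits (m : Int)) := by
  induction m using Nat.strong_induction_on with
  | _ m ih =>
    rcases Nat.eq_zero_or_pos m with h0 | hpos
    · subst h0
      rw [pvDeltas, dif_neg (by norm_num), pvParse]
      simp [pvAltBits, pvCountZeros]
    · have hzc : pvCtz (m : Int) = pvCountZeros (pvAltBits (m : Int)) := pvCtz_eq m hpos
      rw [pvDeltas, dif_pos (Int.natCast_pos.mpr hpos)]
      generalize hz : pvCtz (m : Int) = z at *
      have hrest : PySem.Int.floordiv (m : Int) ((2 : Int) ^ z) = ((m / 2 ^ z : Nat) : Int) := by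
        rw [show ((2:Int) ^ z) = (((2 ^ z : Nat)) : Int) from by push_cast; rfl]
        exact PySem.Int.floordiv_natCast m (2 ^ z)
      rw [hrest]
      have hrm : m / 2 ^ z ≤ m := Nat.div_le_self _ _
      generalize hr : m / 2 ^ z = r at *
      have hbits : pvAltBits ((r : Nat) : Int) = (pvAltBits (m : Int)).drop z := by
        rw [← hr]; exact pvShift z m
      have hlenr : (pvAltBits ((r : Nat) : Int)).length = (pvAltBits (m : Int)).length - z := by
        rw [hbits, List.length_drop]
      have hblr : PySem.Int.bitLength ((r : Nat) : Int) = (pvAltBits ((r : Nat) : Int)).length :=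
        pvBitLength_eq r
      by_cases hcase : PySem.Int.bitLength ((r : Nat) : Int) < z + 1
      · rw [dif_pos hcase, pvParse, dif_neg (by rw [← hzc, List.length_drop]; omega)]
      · rw [dif_neg hcase]
        have hlen : z + 1 ≤ (pvAltBits ((r : Nat) : Int)).length := by omega
        have hrpos : 0 < r := by
          by_contra h0
          have hr0 : r = 0 := by omega
          rw [hr0] at hcase
          simp [PySem.Int.bitLength_zero] at hcase
        have hrlt : r / 2 ^ (z + 1) < m := by
          calc r / 2 ^ (z + 1) ≤ r / 2 := Nat.div_le_div_left (by
                have h21 : 2 ^ 1 ≤ 2 ^ (z + 1) := Nat.pow_le_pow_right (by decide) (by omega)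
                simpa using h21) (by decide)
            _ < r := Nat.div_lt_self hrpos (by decide)
            _ ≤ m := hrm
        have hparse : pvParse (pvAltBits (m : Int)) =
            pvGroupVal (((pvAltBits (m : Int)).drop z).take (z + 1)) ::
              pvParse (((pvAltBits (m : Int)).drop z).drop (z + 1)) := by
          rw [pvParse, dif_pos (by rw [← hzc, List.length_drop]; omega)]
          rw [← hzc]
        rw [hparse, pvTakeBits_eq (z + 1) r 0 hlen]
        dsimp only
        rw [ih (r / 2 ^ (z + 1)) hrlt, pvShift (z + 1) r, hbits]
        rfl

-- ===== VERDICT (by name: the statement is the Claim_ definition above) =====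
theorem gamma_decompress_spec : Claim_equal_gamma_decompress := by
  intro n _ hpre
  unfold Spec_gamma_decompress gamma_decompress gamma_decompress_alt
  rcases eq_or_lt_of_le hpre with h0 | hpos
  · rw [← h0]
    have h1 : pvFmtBin (Int.toNat 0) = ['0'] := by rw [pvFmtBin]; norm_num
    have h2 : pvDeltas 0 = [] := by rw [pvDeltas]; norm_num
    rw [if_neg (by norm_num), h1, h2]
    norm_num [pvAccum, pvAStep]
  · have hn : ((n.toNat : Nat) : Int) = n := Int.toNat_of_nonneg hpre
    have hm : 0 < n.toNat := by omega
    rw [if_neg (by omega), pvFmtBin_eq n.toNat hm, List.reverse_reverse, hn]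
    have hb : ∀ b ∈ pvAltBits n, b = 0 ∨ b = 1 := by
      rw [← hn]; exact pvAltBits_mem n.toNat
    have hd : pvDeltas n = pvParse (pvAltBits n) := by
      rw [← hn]; exact pvDeltas_eq n.toNat
    rw [hd]
    simpa using pvMain (pvAltBits n).length (pvAltBits n) le_rfl hb [] 0
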